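-- pv_equiv track=rewrite | github.com/JAAFAR1996/ai-teddy-bear- | src/domain/value_objects/educational_value_evaluator.py | _assess_skill_mastery
-- ===== SOURCE A (Python) =====
-- from typing import Dict, List
--
-- def _assess_skill_mastery(
--     skill_timeline: Dict[str, List[int]]
-- ) -> Dict[str, str]:
--     """Assess skill mastery levels"""
--     mastery_levels = {}
--
--     for skill, occurrences in skill_timeline.items():
--         if len(occurrences) >= 5:
--             mastery_levels[skill] = "mastered"
--         elif len(occurrences) >= 3:
--             mastery_levels[skill] = "developing"
--         elif len(occurrences) >= 1:
--             mastery_levels[skill] = "introduced"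
--         else:
--             mastery_levels[skill] = "not_covered"
--
--     return mastery_levels
-- ===== SOURCE B (Python) =====
-- from typing import Dict, List
--
-- # Threshold-table re-implementation: a sorted boundary table consulted by
-- # binary search (hand-rolled bisect_right) replaces the chained if/elif ladder.
-- _THRESHOLDS = [1, 3, 5]
-- _LABELS = ["not_covered", "introduced", "developing", "mastered"]
--
-- def _assess_skill_mastery(
--     skill_timeline: Dict[str, List[int]]
-- ) -> Dict[str, str]:
--     """Assess skill mastery levels"""
--     mastery_levels = {}
--     for skill, occurrences in skill_timeline.items():
--         n = len(occurrences)
--         lo, hi = 0, len(_THRESHOLDS)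
--         while lo < hi:  # bisect_right(_THRESHOLDS, n)
--             mid = (lo + hi) // 2
--             if n < _THRESHOLDS[mid]:
--                 hi = mid
--             else:
--                 lo = mid + 1
--         mastery_levels[skill] = _LABELS[lo]
--     return mastery_levels
-- ===== Notes on version B (the rewrite author's own statement) =====
-- stated objective: alternative
-- what changed: Replaces the if/elif/else comparison ladder with an explicit sorted threshold table plus a label table consulted by a binary search (bisect_right), so the boundary data lives in tables instead of control flow.
import Mathlib
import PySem

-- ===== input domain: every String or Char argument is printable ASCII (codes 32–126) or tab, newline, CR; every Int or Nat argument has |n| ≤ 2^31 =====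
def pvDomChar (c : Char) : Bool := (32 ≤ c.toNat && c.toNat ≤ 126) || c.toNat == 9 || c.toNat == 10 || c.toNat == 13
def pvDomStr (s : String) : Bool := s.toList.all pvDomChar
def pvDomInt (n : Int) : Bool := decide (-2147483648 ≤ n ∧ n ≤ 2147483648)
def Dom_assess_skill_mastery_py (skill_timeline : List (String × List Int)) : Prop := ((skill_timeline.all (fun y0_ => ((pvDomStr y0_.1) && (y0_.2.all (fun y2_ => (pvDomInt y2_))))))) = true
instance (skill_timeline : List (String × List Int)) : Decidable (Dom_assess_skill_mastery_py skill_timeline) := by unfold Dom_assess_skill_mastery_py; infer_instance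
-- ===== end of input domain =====

-- B replaces A's if/elif comparison ladder with a sorted threshold table and a
-- binary-search (bisect_right) lookup into a label table; same O(n) cost (objective: alternative).


-- ===== PORT A =====
-- literal transliteration of the if/elif/else ladder building a dict
def assess_skill_mastery_py (skill_timeline : List (String × List Int)) : List (String × String) :=
  (skill_timeline.foldl (fun (d : PySem.Dict String String) p =>
      if p.2.length ≥ 5 then d.insert p.1 "mastered"
      else if p.2.length ≥ 3 then d.insert p.1 "developing"
      else if p.2.length ≥ 1 then d.insert p.1 "introduced"
      else d.insert p.1 "not_covered")
    PySem.Dict.empty).items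

-- ===== PORT B =====
def pvThresholds : List Int := [1, 3, 5]
def pvLabels : List String := ["not_covered", "introduced", "developing", "mastered"]

-- Source B's hand-rolled bisect_right loop; th.getD mid 0 is exact here since mid is
-- always in range (Python would raise only out of range, which never happens)
def pvBisect (th : List Int) (n : Int) (lo hi : Nat) : Nat :=
  if lo < hi then
    let mid := (lo + hi) / 2
    if n < th.getD mid 0 then pvBisect th n lo mid
    else pvBisect th n (mid + 1) hi
  else lo
termination_by hi - lo
decreasing_by all_goals omega

def assess_skill_mastery_py_alt (skill_timeline : List (String × List Int)) : List (String × String) :=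
  (skill_timeline.foldl (fun (d : PySem.Dict String String) p =>
      d.insert p.1 (pvLabels.getD (pvBisect pvThresholds (p.2.length : Int) 0 pvThresholds.length) ""))
    PySem.Dict.empty).items

-- ===== PRECONDITION & SPEC =====
def Spec_assess_skill_mastery_py (skill_timeline : List (String × List Int)) (out : List (String × String)) : Prop := out = assess_skill_mastery_py_alt skill_timeline
instance (skill_timeline : List (String × List Int)) (out : List (String × String)) : Decidable (Spec_assess_skill_mastery_py skill_timeline out) := by unfold Spec_assess_skill_mastery_py; infer_instance

-- ===== CLAIM (what is proved, stated in full; the proofs are below) =====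
def Claim_equal_assess_skill_mastery_py : Prop := ∀ (skill_timeline : List (String × List Int)), Dom_assess_skill_mastery_py skill_timeline → Spec_assess_skill_mastery_py skill_timeline (assess_skill_mastery_py skill_timeline)

-- ===== LEMMAS AND PROOFS =====

-- the binary search over the literal table [1,3,5] computes the ladder's index
theorem pvBisect_eval (n : Int) :
    pvBisect pvThresholds n 0 3 =
      if n ≥ 5 then 3 else if n ≥ 3 then 2 else if n ≥ 1 then 1 else 0 := by
  have e23 : pvBisect [1,3,5] n 2 3 = if n ≥ 5 then 3 else 2 := by
    rw [pvBisect]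
    norm_num
    rw [pvBisect, pvBisect]
    split_ifs <;> simp_all
    omega
  have e01 : pvBisect [1,3,5] n 0 1 = if n ≥ 1 then 1 else 0 := by
    rw [pvBisect]
    norm_num
    rw [pvBisect, pvBisect]
    split_ifs <;> simp_all
    omega
  rw [pvBisect]
  norm_num [pvThresholds]
  rw [e01, e23]
  split_ifs <;> simp_all <;> omega

-- the per-entry labels of the two programs agree
theorem label_eq (o : List Int) :
    (if o.length ≥ 5 then "mastered"
     else if o.length ≥ 3 then "developing"
     else if o.length ≥ 1 then "introduced"
     else "not_covered")
    = pvLabels.getD (pvBisect pvThresholds (o.length : Int) 0 pvThresholds.length) "" := by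
  rw [show pvThresholds.length = 3 from rfl, pvBisect_eval]
  split_ifs <;> (try omega) <;> simp [pvLabels]

-- ===== VERDICT (by name: the statement is the Claim_ definition above) =====
theorem assess_skill_mastery_py_spec : Claim_equal_assess_skill_mastery_py := by
  intro st _
  unfold Spec_assess_skill_mastery_py assess_skill_mastery_py assess_skill_mastery_py_alt
  have hf : (fun (d : PySem.Dict String String) (p : String × List Int) =>
      if p.2.length ≥ 5 then d.insert p.1 "mastered"
      else if p.2.length ≥ 3 then d.insert p.1 "developing"
      else if p.2.length ≥ 1 then d.insert p.1 "introduced"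
      else d.insert p.1 "not_covered")
      = (fun (d : PySem.Dict String String) (p : String × List Int) =>
      d.insert p.1 (pvLabels.getD (pvBisect pvThresholds (p.2.length : Int) 0 pvThresholds.length) "")) := by
    funext d p
    rw [← label_eq p.2]
    split_ifs <;> rfl
  rw [hf]
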